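-- pv_equiv track=rewrite | github.com/MaxTop60/TorubarovME | lab 11/src/modules/prefix_function.py | find_all_prefix_occurrences
-- ===== SOURCE A (Python) =====
-- def prefix_function(s):
--     """
--     Эффективное вычисление префикс-функции за O(n).
--
--     Args:
--         s: входная строка
--
--     Returns:
--         список π - префикс-функция для строки s
--
--     Сложность:
--         Время: O(n) - линейная сложность
--         Память: O(n) - для хранения префикс-функции
--
--     Алгоритм:
--         Использует идею, что π[i] ≤ π[i-1] + 1
--         и переиспользует ранее вычисленные значения
--     """
--     n = len(s)
--     pi = [0] * n
--
--     for i in range(1, n):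
--         j = pi[i - 1]
--
--         while j > 0 and s[i] != s[j]:
--             j = pi[j - 1]
--
--         if s[i] == s[j]:
--             j += 1
--
--         pi[i] = j
--
--     return pi
--
-- def find_all_prefix_occurrences(s, prefix):
--     """
--     Нахождение всех вхождений префикса в строку с использованием префикс-функции.
--
--     Args:
--         s: строка для поиска
--         prefix: префикс для поиска
--
--     Returns:
--         Список позиций, где заканчиваются вхождения префикса
--     """
--     if not prefix:
--         return list(range(len(s) + 1))
--
--     # Создаем строку prefix + '#' + s для вычисления префикс-функции
--     combined = prefix + "#" + s
--     pi = prefix_function(combined)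
--
--     result = []
--     prefix_len = len(prefix)
--
--     # Ищем позиции, где префикс-функция равна длине префикса
--     for i in range(prefix_len + 1, len(combined)):
--         if pi[i] == prefix_len:
--             # Вычисляем позицию в исходной строке s
--             pos_in_s = i - 2 * prefix_len
--             result.append(pos_in_s)
--
--     return result
-- ===== SOURCE B (Python) =====
-- def find_all_prefix_occurrences(s, prefix):
--     L = len(prefix)
--     return [i for i in range(len(s) + 1) if s[i:i+L] == prefix]
-- ===== Notes on version B (the rewrite author's own statement) =====
-- stated objective: simpler
-- what changed: Replaces the KMP prefix-function-over-'prefix#s' automaton (combined string, failure table, while-loop) with a one-line direct slice-comparison scan over every position of s.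
-- intended difference: On inputs where the sentinel '#' occurs in s or prefix in a way that gives the combined string prefix+'#'+s a border of length len(prefix) ending in the sentinel zone or a border longer than len(prefix) at a true occurrence, A reports negative positions and/or silently drops true occurrences (e.g. A('a#a','a') = [0]); B returns the true occurrence start positions ([0, 2]), which is the intended result since '#' is only A's internal separator trick. — e.g. on find_all_prefix_occurrences("a#a", "a"): A returns [0], B returns [0, 2]
import Mathlib
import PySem

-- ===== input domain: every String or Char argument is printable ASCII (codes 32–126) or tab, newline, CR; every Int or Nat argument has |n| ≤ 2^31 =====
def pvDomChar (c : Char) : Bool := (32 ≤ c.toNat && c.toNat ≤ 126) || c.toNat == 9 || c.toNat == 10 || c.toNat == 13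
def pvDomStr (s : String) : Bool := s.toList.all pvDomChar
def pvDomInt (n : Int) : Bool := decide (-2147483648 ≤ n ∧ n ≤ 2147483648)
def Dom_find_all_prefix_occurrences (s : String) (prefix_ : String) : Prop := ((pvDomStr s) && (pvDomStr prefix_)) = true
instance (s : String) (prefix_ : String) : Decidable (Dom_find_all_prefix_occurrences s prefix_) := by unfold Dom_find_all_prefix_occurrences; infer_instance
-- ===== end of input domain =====

-- B replaces A's KMP prefix-function-over-'prefix#s' automaton by a direct slice-comparison
-- scan (simpler); where A's '#' sentinel collides with the inputs (D_ below) B returns the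
-- intended occurrence positions instead of A's accidental ones.

-- ===== PORT A =====
-- the 'while j > 0 and s[i] != s[j]' loop of prefix_function; fuel only makes the
-- recursion structural (j strictly decreases on every real run, proved below)
def pfWhile (t : List Char) (piv : List Int) (i : Nat) : Nat → Int → Int
  | 0, j => j
  | fuel + 1, j =>
    if 0 < j ∧ PySem.List.pyGet? t (i : Int) ≠ PySem.List.pyGet? t j then
      -- pi[j-1]: always in range on a real run (0 < j ≤ i-1 < len), so the default is never read
      pfWhile t piv i fuel (PySem.List.pyGetD piv (j - 1) 0)
    else j

-- 'for i in range(1, n)': i counts up, rem counts the remaining iterations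
def pfLoop (t : List Char) : Nat → Nat → List Int → List Int
  | _, 0, piv => piv
  | i, rem + 1, piv =>
    -- j = pi[i-1]: in range on a real run
    let j0 := PySem.List.pyGetD piv ((i : Int) - 1) 0
    let j1 := pfWhile t piv i i j0
    let j2 := if PySem.List.pyGet? t (i : Int) = PySem.List.pyGet? t j1 then j1 + 1 else j1
    pfLoop t (i + 1) rem (piv.set i j2)

def prefix_function (t : List Char) : List Int :=
  pfLoop t 1 (t.length - 1) (List.replicate t.length 0)

def find_all_prefix_occurrences (s : String) (prefix_ : String) : List Int :=
  if prefix_.toList = [] then PySem.List.pyRange 0 ((s.toList.length : Int) + 1) 1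
  else
    let combined := prefix_.toList ++ '#' :: s.toList
    let piv := prefix_function combined
    let L : Int := (prefix_.toList.length : Int)
    (PySem.List.pyRange (L + 1) (combined.length : Int) 1).foldl
      (fun result i =>
        -- pi[i]: i is always in range here
        if PySem.List.pyGetD piv i 0 = L then result ++ [i - 2 * L] else result) []

-- ===== PORT B =====
def find_all_prefix_occurrences_alt (s : String) (prefix_ : String) : List Int :=
  let L : Int := (prefix_.toList.length : Int)
  (PySem.List.pyRange 0 ((s.toList.length : Int) + 1) 1).filter
    (fun i => PySem.List.slice s.toList (some i) (some (i + L)) == prefix_.toList)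

-- ===== PRECONDITION & SPEC =====
-- 'k is a proper border of t[:e]' (pointwise, runs nothing)
def brdAt (t : List Char) (e k : Nat) : Bool :=
  decide (k < e) && decide (e ≤ t.length) && (List.range k).all (fun m => t[m]? == t[e - k + m]?)

-- On inputs where the sentinel '#' occurs in s or prefix_ in a way that gives prefix_+'#'+s a
-- border of length |prefix_| ending inside the sentinel zone or a border longer than |prefix_|
-- at a true occurrence, A reports negative positions and/or drops true occurrences, while B
-- returns the true occurrence start positions, which is the intended result.
def D_find_all_prefix_occurrences (s : String) (prefix_ : String) : Prop :=
  let p := prefix_.toList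
  let l := s.toList
  let t := p ++ '#' :: l
  let L := p.length
  p ≠ [] ∧ ('#' ∈ p ∨ '#' ∈ l) ∧
    ((∃ i < t.length, L + 1 ≤ i ∧ i < 2 * L ∧ brdAt t (i + 1) L = true ∧
        ∀ k < i + 1, L < k → brdAt t (i + 1) k = false)
     ∨ (∃ q < l.length + 1, q + L ≤ l.length ∧ (∀ m < L, l[q + m]? = p[m]?) ∧
        ∃ k < q + 2 * L + 1, L < k ∧ brdAt t (q + 2 * L + 1) k = true))

instance (s : String) (prefix_ : String) : Decidable (D_find_all_prefix_occurrences s prefix_) := by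
  unfold D_find_all_prefix_occurrences; infer_instance

def Spec_find_all_prefix_occurrences (s : String) (prefix_ : String) (out : List Int) : Prop :=
  ¬ D_find_all_prefix_occurrences s prefix_ → out = find_all_prefix_occurrences_alt s prefix_
instance (s : String) (prefix_ : String) (out : List Int) : Decidable (Spec_find_all_prefix_occurrences s prefix_ out) := by
  unfold Spec_find_all_prefix_occurrences; infer_instance

def pvDiffWitness_find_all_prefix_occurrences : String × String := ("a#a", "a")
def pvDiffWitnessOut_find_all_prefix_occurrences : (List Int) × (List Int) := ([0], [0, 2])

-- ===== CLAIM (what is proved, stated in full; the proofs are below) =====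
def Claim_unchanged_find_all_prefix_occurrences : Prop := ∀ (s : String) (prefix_ : String), Dom_find_all_prefix_occurrences s prefix_ → Spec_find_all_prefix_occurrences s prefix_ (find_all_prefix_occurrences s prefix_)
def Claim_changed_find_all_prefix_occurrences : Prop := Dom_find_all_prefix_occurrences (pvDiffWitness_find_all_prefix_occurrences.1) (pvDiffWitness_find_all_prefix_occurrences.2) ∧ D_find_all_prefix_occurrences (pvDiffWitness_find_all_prefix_occurrences.1) (pvDiffWitness_find_all_prefix_occurrences.2) ∧ find_all_prefix_occurrences (pvDiffWitness_find_all_prefix_occurrences.1) (pvDiffWitness_find_all_prefix_occurrences.2) = pvDiffWitnessOut_find_all_prefix_occurrences.1 ∧ find_all_prefix_occurrences_alt (pvDiffWitness_find_all_prefix_occurrences.1) (pvDiffWitness_find_all_prefix_occurrences.2) = pvDiffWitnessOut_find_all_prefix_occurrences.2 ∧ pvDiffWitnessOut_find_all_prefix_occurrences.1 ≠ pvDiffWitnessOut_find_all_prefix_occurrences.2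
def Claim_exact_find_all_prefix_occurrences : Prop := ∀ (s : String) (prefix_ : String), Dom_find_all_prefix_occurrences s prefix_ → D_find_all_prefix_occurrences s prefix_ → find_all_prefix_occurrences s prefix_ ≠ find_all_prefix_occurrences_alt s prefix_

-- ===== LEMMAS AND PROOFS =====

def BrdAt (t : List Char) (e k : Nat) : Prop :=
  k < e ∧ e ≤ t.length ∧ ∀ m, m < k → t[m]? = t[e - k + m]?

def GoodAt (t : List Char) (m : Nat) (v : Int) : Prop :=
  0 ≤ v ∧ BrdAt t (m + 1) v.toNat ∧ ∀ k, BrdAt t (m + 1) k → k ≤ v.toNat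

theorem brdAt_iff (t : List Char) (e k : Nat) : brdAt t e k = true ↔ BrdAt t e k := by
  simp [brdAt, BrdAt, List.all_eq_true, and_assoc]

theorem brd_zero (t : List Char) (e : Nat) (h1 : 0 < e) (h2 : e ≤ t.length) : BrdAt t e 0 :=
  ⟨h1, h2, fun m hm => absurd hm (by omega)⟩

theorem brd_nest (t : List Char) (e k c : Nat) (hk : BrdAt t e k) (hc : BrdAt t e c)
    (hlt : c < k) : BrdAt t k c := by
  obtain ⟨hk1, hk2, hk3⟩ := hk
  obtain ⟨hc1, hc2, hc3⟩ := hc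
  refine ⟨hlt, by omega, fun m hm => ?_⟩
  have h1 := hc3 m hm
  have h2 := hk3 (k - c + m) (by omega)
  have he : e - k + (k - c + m) = e - c + m := by omega
  rw [he] at h2
  rw [h1, ← h2]

theorem brd_trans (t : List Char) (e k c : Nat) (hk : BrdAt t e k) (hc : BrdAt t k c) :
    BrdAt t e c := by
  obtain ⟨hk1, hk2, hk3⟩ := hk
  obtain ⟨hc1, hc2, hc3⟩ := hc
  refine ⟨by omega, hk2, fun m hm => ?_⟩
  have h1 := hc3 m hm
  have h2 := hk3 (k - c + m) (by omega)
  have he : e - k + (k - c + m) = e - c + m := by omega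
  rw [he] at h2
  rw [h1, ← h2]

theorem brd_extend (t : List Char) (e k : Nat) (he : e < t.length) :
    BrdAt t (e + 1) (k + 1) ↔ BrdAt t e k ∧ t[k]? = t[e]? := by
  constructor
  · rintro ⟨h1, h2, h3⟩
    refine ⟨⟨by omega, by omega, fun m hm => ?_⟩, ?_⟩
    · have := h3 m (by omega)
      have he2 : e + 1 - (k + 1) + m = e - k + m := by omega
      rwa [he2] at this
    · have := h3 k (by omega)
      have he2 : e + 1 - (k + 1) + k = e := by omega
      rwa [he2] at this
  · rintro ⟨⟨h1, h2, h3⟩, h4⟩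
    refine ⟨by omega, by omega, fun m hm => ?_⟩
    have he2 : e + 1 - (k + 1) + m = e - k + m := by omega
    rw [he2]
    rcases Nat.lt_or_ge m k with h | h
    · exact h3 m h
    · have : m = k := by omega
      subst this
      rw [h4]; congr 1; omega

theorem pfWhile_spec (t : List Char) (piv : List Int) (i : Nat)
    (hi1 : 1 ≤ i)
    (H : ∀ m, m < i → GoodAt t m (piv.getD m 0)) :
    ∀ fuel (j : Int), 0 ≤ j → j.toNat ≤ fuel → j.toNat < i → BrdAt t i j.toNat →
      (∀ c, BrdAt t i c → t[c]? = t[i]? → c ≤ j.toNat) →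
      (0 ≤ pfWhile t piv i fuel j ∧ (pfWhile t piv i fuel j).toNat < i ∧
        BrdAt t i (pfWhile t piv i fuel j).toNat ∧
        (∀ c, BrdAt t i c → t[c]? = t[i]? → c ≤ (pfWhile t piv i fuel j).toNat) ∧
        (pfWhile t piv i fuel j = 0 ∨ t[(pfWhile t piv i fuel j).toNat]? = t[i]?)) := by
  intro fuel
  induction fuel with
  | zero =>
    intro j hj0 hjf hji hbrd hcomp
    have hj : j = 0 := by omega
    subst hj
    simp only [pfWhile]
    exact ⟨le_refl 0, by omega, hbrd, hcomp, Or.inl (by trivial)⟩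
  | succ fuel ih =>
    intro j hj0 hjf hji hbrd hcomp
    rw [pfWhile]
    split
    · rename_i hcond
      obtain ⟨hjpos, hne⟩ := hcond
      -- j' = pi[j-1]
      have hcast : j - 1 = ((j.toNat - 1 : Nat) : Int) := by omega
      rw [hcast, PySem.List.pyGetD_natCast]
      set j' := piv.getD (j.toNat - 1) 0 with hj'
      have hm := H (j.toNat - 1) (by omega)
      rw [← hj'] at hm
      obtain ⟨hj'0, hj'brd, hj'max⟩ := hm
      have hsucc : j.toNat - 1 + 1 = j.toNat := by omega
      rw [hsucc] at hj'brd hj'max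
      have hj'lt : j'.toNat < j.toNat := hj'brd.1
      -- t[i]? ≠ t[j.toNat]?
      have hne' : t[i]? ≠ t[j.toNat]? := by
        rw [PySem.List.pyGet?_natCast, PySem.List.pyGet?_of_nonneg (xs := t) (i := j) (h := by omega)] at hne
        exact hne
      apply ih j' hj'0 (by omega) (by omega)
        (brd_trans t i j.toNat j'.toNat hbrd hj'brd)
      intro c hc hmatch
      have hcle : c ≤ j.toNat := hcomp c hc hmatch
      have hcne : c ≠ j.toNat := by
        intro h; subst h; exact hne' hmatch.symm
      exact hj'max c (brd_nest t i j.toNat c hbrd hc (by omega))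
    · rename_i hcond
      push Not at hcond
      refine ⟨hj0, hji, hbrd, hcomp, ?_⟩
      rcases Nat.eq_zero_or_pos j.toNat with h | h
      · exact Or.inl (by omega)
      · have := hcond (by omega)
        rw [PySem.List.pyGet?_natCast, PySem.List.pyGet?_of_nonneg (xs := t) (i := j) (h := by omega)] at this
        exact Or.inr this.symm

theorem pfLoop_spec (t : List Char) :
    ∀ rem i piv, 1 ≤ i → i + rem = t.length → piv.length = t.length →
      (∀ m, m < i → GoodAt t m (piv.getD m 0)) →
      ∀ m, m < t.length → GoodAt t m ((pfLoop t i rem piv).getD m 0) := by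
  intro rem
  induction rem with
  | zero =>
    intro i piv _ hlen _ H m hm
    simpa [pfLoop] using H m (by omega)
  | succ rem ih =>
    intro i piv hi1 hlen hpl H
    have hilt : i < t.length := by omega
    rw [pfLoop]
    -- j0 = pi[i-1]
    have hcast : (i : Int) - 1 = ((i - 1 : Nat) : Int) := by omega
    rw [hcast, PySem.List.pyGetD_natCast]
    set j0 := piv.getD (i - 1) 0 with hj0def
    have hg0 := H (i - 1) (by omega)
    rw [← hj0def] at hg0
    obtain ⟨hj00, hj0brd, hj0max⟩ := hg0
    have hsucc : i - 1 + 1 = i := by omega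
    rw [hsucc] at hj0brd hj0max
    have hj0lt : j0.toNat < i := hj0brd.1
    set j1 := pfWhile t piv i i j0 with hj1def
    have W := pfWhile_spec t piv i hi1 H i j0 hj00 (by omega) hj0lt hj0brd
      (fun c hc _ => hj0max c hc)
    rw [← hj1def] at W
    obtain ⟨hr0, hri, hrbrd, hrcomp, hrexit⟩ := W
    -- the entry written at index i is Good
    have hgood : ∀ j2, (PySem.List.pyGet? t (i : Int) = PySem.List.pyGet? t j1 → j2 = j1 + 1) →
        ((PySem.List.pyGet? t (i : Int) ≠ PySem.List.pyGet? t j1) → j2 = j1) →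
        GoodAt t i j2 := by
      intro j2 heq hne
      by_cases hc : PySem.List.pyGet? t (i : Int) = PySem.List.pyGet? t j1
      · have hj2 : j2 = j1 + 1 := heq hc
        rw [PySem.List.pyGet?_natCast, PySem.List.pyGet?_of_nonneg (xs := t) (i := j1) (h := hr0)] at hc
        refine ⟨by omega, ?_, ?_⟩
        · have : j2.toNat = j1.toNat + 1 := by omega
          rw [this]
          exact (brd_extend t i j1.toNat hilt).2 ⟨hrbrd, hc.symm⟩
        · intro k hk
          match k with
          | 0 => omega
          | (c + 1) =>
            have := (brd_extend t i c hilt).1 hk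
            have hcle := hrcomp c this.1 this.2
            omega
      · have hj2 : j2 = j1 := hne hc
        have hr00 : j1 = 0 := by
          rcases hrexit with h | h
          · exact h
          · exfalso
            rw [PySem.List.pyGet?_natCast, PySem.List.pyGet?_of_nonneg (xs := t) (i := j1) (h := hr0)] at hc
            exact hc h.symm
        rw [PySem.List.pyGet?_natCast, PySem.List.pyGet?_of_nonneg (xs := t) (i := j1) (h := hr0)] at hc
        rw [hr00] at hc
        refine ⟨by omega, ?_, ?_⟩
        · have : j2.toNat = 0 := by omega
          rw [this]
          exact brd_zero t (i + 1) (by omega) (by omega)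
        · intro k hk
          match k with
          | 0 => omega
          | (c + 1) =>
            exfalso
            have := (brd_extend t i c hilt).1 hk
            have hcle := hrcomp c this.1 this.2
            have hc0 : c = 0 := by omega
            rw [hc0] at this
            exact hc (by simpa [Int.toNat_zero] using this.2.symm)
    -- recurse
    apply ih (i + 1) (piv.set i _) (by omega) (by omega) (by simpa using hpl)
    intro m hm
    rcases Nat.lt_or_ge m i with h | h
    · have hset : (piv.set i (if PySem.List.pyGet? t (i : Int) = PySem.List.pyGet? t j1 then j1 + 1 else j1)).getD m 0 = piv.getD m 0 := by
        unfold List.getD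
        rw [List.getElem?_set_ne (by omega)]
      rw [hset]
      exact H m h
    · have hmi : m = i := by omega
      subst hmi
      have hset : (piv.set m (if PySem.List.pyGet? t (m : Int) = PySem.List.pyGet? t j1 then j1 + 1 else j1)).getD m 0 = (if PySem.List.pyGet? t (m : Int) = PySem.List.pyGet? t j1 then j1 + 1 else j1) := by
        unfold List.getD
        rw [List.getElem?_set_self (by omega)]
        rfl
      rw [hset]
      split
      · rename_i hcc
        exact hgood _ (fun _ => rfl) (fun hn => absurd hcc hn)
      · rename_i hcc
        exact hgood _ (fun hn => absurd hn hcc) (fun _ => rfl)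

theorem prefix_function_spec (t : List Char) (ht : 1 ≤ t.length) :
    ∀ m, m < t.length → GoodAt t m ((prefix_function t).getD m 0) := by
  unfold prefix_function
  apply pfLoop_spec t (t.length - 1) 1 _ (le_refl 1) (by omega) (by simp)
  intro m hm
  have hm0 : m = 0 := by omega
  subst hm0
  have : (List.replicate t.length (0 : Int)).getD 0 0 = 0 := by
    unfold List.getD
    rcases t with _ | ⟨c, t'⟩
    · simp at ht
    · simp
  rw [this]
  exact ⟨le_refl 0, brd_zero t 1 (by omega) ht, fun k hk => by have := hk.1; omega⟩

theorem t_get_right (p l : List Char) (x : Nat) : (p ++ '#' :: l)[p.length + 1 + x]? = l[x]? := by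
  rw [List.getElem?_append_right (by omega)]
  have h : p.length + 1 + x - p.length = x + 1 := by omega
  rw [h, List.getElem?_cons_succ]

theorem t_len (p l : List Char) : (p ++ '#' :: l).length = p.length + 1 + l.length := by
  simp [List.length_append]
  omega

theorem occ_brd (p l : List Char) (q : Nat) (hL : 1 ≤ p.length) (hq : q + p.length ≤ l.length) :
    BrdAt (p ++ '#' :: l) (q + 2 * p.length + 1) p.length ↔
      ∀ m, m < p.length → l[q + m]? = p[m]? := by
  have htl := t_len p l
  constructor
  · rintro ⟨h1, h2, h3⟩ m hm
    have := h3 m hm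
    rw [List.getElem?_append_left hm] at this
    have hidx : q + 2 * p.length + 1 - p.length + m = p.length + 1 + (q + m) := by omega
    rw [hidx, t_get_right] at this
    exact this.symm
  · intro hocc
    refine ⟨by omega, by omega, fun m hm => ?_⟩
    rw [List.getElem?_append_left hm]
    have hidx : q + 2 * p.length + 1 - p.length + m = p.length + 1 + (q + m) := by omega
    rw [hidx, t_get_right]
    exact (hocc m hm).symm

theorem good_eq_L (t : List Char) (iN L : Nat) (v : Int) (hg : GoodAt t iN v) :
    v = (L : Int) ↔ (BrdAt t (iN + 1) L ∧ ∀ k, L < k → ¬ BrdAt t (iN + 1) k) := by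
  obtain ⟨h0, hbrd, hmax⟩ := hg
  constructor
  · intro hv
    have hvn : v.toNat = L := by omega
    rw [hvn] at hbrd hmax
    exact ⟨hbrd, fun k hk hbk => by have := hmax k hbk; omega⟩
  · rintro ⟨hb, hno⟩
    have h1 : L ≤ v.toNat := hmax L hb
    have h2 : ¬ (L < v.toNat) := fun h => hno v.toNat h hbrd
    omega

theorem slice_eq_iff (l p : List Char) (q : Nat) (hL : 1 ≤ p.length) :
    (l.drop q).take p.length = p ↔
      (q + p.length ≤ l.length ∧ ∀ m, m < p.length → l[q + m]? = p[m]?) := by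
  constructor
  · intro h
    have hlen := congrArg List.length h
    simp only [List.length_take, List.length_drop] at hlen
    refine ⟨by omega, fun m hm => ?_⟩
    calc l[q + m]? = (l.drop q)[m]? := (List.getElem?_drop).symm
      _ = ((l.drop q).take p.length)[m]? := by rw [List.getElem?_take, if_pos hm]
      _ = p[m]? := by rw [h]
  · rintro ⟨hql, hpt⟩
    apply List.ext_getElem?
    intro m
    rw [List.getElem?_take]
    split
    · rename_i hm
      rw [List.getElem?_drop]
      exact hpt m hm
    · rename_i hm
      exact (List.getElem?_eq_none (by omega)).symm

theorem filt_shift (L S : Nat) (hL : 1 ≤ L) (PB : Nat → Bool)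
    (hPB : ∀ q, PB q = true → q + L ≤ S) :
    (List.range S).filter (fun k => decide (L ≤ k + 1) && PB (k + 1 - L))
      = ((List.range (S + 1)).filter PB).map (fun q => q + (L - 1)) := by
  set pA := fun k => decide (L ≤ k + 1) && PB (k + 1 - L) with hpA
  have hcomp : ∀ q, pA (q + (L - 1)) = PB q := by
    intro q
    have h1 : L ≤ q + (L - 1) + 1 := by omega
    have h2 : q + (L - 1) + 1 - L = q := by omega
    simp [hpA, h1, h2]
  have hswap : ∀ (M : Nat), ((List.range M).filter PB).map (fun q => q + (L - 1))
      = ((List.range M).map (fun q => q + (L - 1))).filter pA := by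
    intro M
    rw [List.filter_map]
    congr 1
    exact (List.filter_congr (fun q _ => (hcomp q).symm) : _ = List.filter (pA ∘ fun q => q + (L-1)) _)
  rcases Nat.lt_or_ge S (L - 1) with hcase | hcase
  · have hlhs : (List.range S).filter pA = [] := by
      rw [List.filter_eq_nil_iff]
      intro k hk
      rw [List.mem_range] at hk
      simp [hpA]
      intro h; omega
    have hrhs : (List.range (S + 1)).filter PB = [] := by
      rw [List.filter_eq_nil_iff]
      intro q hq hPBq
      have := hPB _ hPBq
      omega
    rw [hlhs, hrhs]
    rfl
  · have hsplit1 : S = (L - 1) + (S - (L - 1)) := by omega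
    have hlhs : (List.range S).filter pA
        = ((List.range (S - (L - 1))).map (fun x => (L - 1) + x)).filter pA := by
      conv_lhs => rw [hsplit1, List.range_add]
      rw [List.filter_append]
      have : (List.range (L - 1)).filter pA = [] := by
        rw [List.filter_eq_nil_iff]
        intro k hk
        rw [List.mem_range] at hk
        simp [hpA]
        intro h; omega
      rw [this, List.nil_append]
    have hsplit2 : S + 1 = (S - (L - 1)) + L := by omega
    have hrhs2 : (List.range (S + 1)).filter PB = (List.range (S - (L - 1))).filter PB := by
      conv_lhs => rw [hsplit2, List.range_add]
      rw [List.filter_append]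
      have : ((List.range L).map (fun x => (S - (L - 1)) + x)).filter PB = [] := by
        rw [List.filter_eq_nil_iff]
        intro q hq
        simp only [List.mem_map, List.mem_range] at hq
        obtain ⟨x, hx, rfl⟩ := hq
        intro hPBq
        have := hPB _ hPBq
        omega
      rw [this, List.append_nil]
    rw [hlhs, hrhs2, hswap]
    congr 1
    exact List.map_congr_left (fun x _ => by omega)

theorem main_eq_list (p l : List Char) (hp : p ≠ [])
    (hnspur : ¬ (∃ i < (p ++ '#' :: l).length, p.length + 1 ≤ i ∧ i < 2 * p.length ∧
        brdAt (p ++ '#' :: l) (i + 1) p.length = true ∧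
        ∀ k < i + 1, p.length < k → brdAt (p ++ '#' :: l) (i + 1) k = false))
    (hnmiss : ¬ (∃ q < l.length + 1, q + p.length ≤ l.length ∧
        (∀ m < p.length, l[q + m]? = p[m]?) ∧
        ∃ k < q + 2 * p.length + 1, p.length < k ∧
          brdAt (p ++ '#' :: l) (q + 2 * p.length + 1) k = true)) :
    (PySem.List.pyRange ((p.length : Int) + 1) (((p ++ '#' :: l).length : Nat) : Int)).foldl
      (fun result i =>
        if PySem.List.pyGetD (prefix_function (p ++ '#' :: l)) i 0 = (p.length : Int) then
          result ++ [i - 2 * (p.length : Int)]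
        else result) []
      = (PySem.List.pyRange 0 ((l.length : Int) + 1)).filter
          (fun i => PySem.List.slice l (some i) (some (i + (p.length : Int))) == p) := by
  set t := p ++ '#' :: l with ht
  set L := p.length with hLdef
  set S := l.length with hSdef
  have hL : 1 ≤ L := by
    rw [hLdef]
    cases p
    · exact absurd rfl hp
    · simp
  have htlen : t.length = L + 1 + S := t_len p l
  have hG := prefix_function_spec t (by omega)
  set piv := prefix_function t with hpiv
  set PB : Nat → Bool := fun q => decide (q + L ≤ S ∧ ∀ m, m < L → l[q + m]? = p[m]?) with hPBdef
  have hPB : ∀ q, PB q = true → q + L ≤ S := by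
    intro q h
    rw [hPBdef] at h
    exact (of_decide_eq_true h).1
  -- pointwise characterization of A's test
  have htest : ∀ k ∈ List.range S,
      (decide (piv.getD (L + 1 + k) 0 = (L : Int))) = (decide (L ≤ k + 1) && PB (k + 1 - L)) := by
    intro k hk
    have hkS : k < S := List.mem_range.1 hk
    have hg := hG (L + 1 + k) (by omega)
    rw [Bool.eq_iff_iff]
    simp only [decide_eq_true_eq, Bool.and_eq_true, hPBdef]
    rw [good_eq_L t (L + 1 + k) L _ hg]
    constructor
    · rintro ⟨hb, hno⟩
      have hk1L : L ≤ k + 1 := by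
        by_contra hlt
        apply hnspur
        refine ⟨L + 1 + k, by omega, by omega, by omega, (brdAt_iff _ _ _).2 hb, ?_⟩
        intro k' _ hgt
        cases hbb : brdAt t (L + 1 + k + 1) k' with
        | false => rfl
        | true => exact absurd ((brdAt_iff _ _ _).1 hbb) (hno k' hgt)
      have hqe : (k + 1 - L) + 2 * L + 1 = (L + 1 + k) + 1 := by omega
      refine ⟨hk1L, by omega, ?_⟩
      intro m hm
      exact ((occ_brd p l (k + 1 - L) hL (by omega)).1 (by rw [hqe]; exact hb)) m hm
    · rintro ⟨hk1L, hqS, hocc⟩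
      have hqe : (k + 1 - L) + 2 * L + 1 = (L + 1 + k) + 1 := by omega
      have hb : BrdAt t ((L + 1 + k) + 1) L := by
        rw [← hqe]
        exact (occ_brd p l (k + 1 - L) hL (by omega)).2 hocc
      refine ⟨hb, fun k' hgt hbk' => ?_⟩
      apply hnmiss
      refine ⟨k + 1 - L, by omega, by omega, hocc, k', ?_, hgt, ?_⟩
      · have := hbk'.1; omega
      · exact (brdAt_iff _ _ _).2 (by rw [hqe]; exact hbk')
  -- A side
  have hcastS : (((t.length : Nat) : Int) - ((L : Int) + 1)).toNat = S := by omega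
  rw [PySem.List.foldl_append_ite (fun i => PySem.List.pyGetD piv i 0 = (L : Int))
        (fun i => i - 2 * (L : Int)), List.nil_append]
  rw [PySem.List.pyRange_one, hcastS, List.filter_map, List.map_map]
  have hpred : ∀ k ∈ List.range S,
      ((fun i => decide (PySem.List.pyGetD piv i 0 = (L : Int))) ∘ fun k : Nat => (L : Int) + 1 + (k : Int)) k
        = (fun k => decide (L ≤ k + 1) && PB (k + 1 - L)) k := by
    intro k hk
    have hc : (L : Int) + 1 + (k : Int) = ((L + 1 + k : Nat) : Int) := by push_cast; ring
    simp only [Function.comp, hc, PySem.List.pyGetD_natCast]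
    exact htest k hk
  rw [List.filter_congr hpred]
  rw [filt_shift L S hL PB hPB]
  rw [List.map_map]
  -- B side
  have hcast1 : ((S : Int) + 1) = ((S + 1 : Nat) : Int) := by push_cast; ring
  rw [hcast1, PySem.List.pyRange_zero_natCast, List.filter_map]
  have hpredB : ∀ q ∈ List.range (S + 1),
      ((fun i => PySem.List.slice l (some i) (some (i + (L : Int))) == p) ∘ fun q : Nat => (q : Int)) q
        = PB q := by
    intro q _
    simp only [Function.comp]
    rw [PySem.List.slice_natCast_add]
    rw [Bool.eq_iff_iff]
    simp only [beq_iff_eq, hPBdef, decide_eq_true_eq]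
    exact slice_eq_iff l p q hL
  rw [List.filter_congr hpredB]
  apply List.map_congr_left
  intro q _
  simp only [Function.comp]
  have : ((q + (L - 1) : Nat) : Int) = (q : Int) + (L : Int) - 1 := by omega
  rw [this]
  ring

theorem empty_case (s prefix_ : String) (hp : prefix_.toList = []) :
    find_all_prefix_occurrences s prefix_ = find_all_prefix_occurrences_alt s prefix_ := by
  simp only [find_all_prefix_occurrences, find_all_prefix_occurrences_alt, hp, if_true]
  symm
  rw [List.filter_eq_self]
  intro a ha
  have hmem := PySem.List.mem_pyRange_one.1 ha
  have h0 : (0:Int) ≤ a := hmem.1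
  have hslice : PySem.List.slice s.toList (some a) (some (a + ([] : List Char).length)) = [] := by
    simp only [List.length_nil, Nat.cast_zero, add_zero]
    rw [PySem.List.slice_toNat (xs := s.toList) (a := a) (b := a) h0 h0]
    simp
  rw [hslice]
  rfl

theorem spur_hash (p l : List Char)
    (h : ∃ i < (p ++ '#' :: l).length, p.length + 1 ≤ i ∧ i < 2 * p.length ∧
        brdAt (p ++ '#' :: l) (i + 1) p.length = true ∧
        ∀ k < i + 1, p.length < k → brdAt (p ++ '#' :: l) (i + 1) k = false) : '#' ∈ p := by
  obtain ⟨i, hiN, hiL, hi2L, hbrd, -⟩ := h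
  obtain ⟨h1, h2, h3⟩ := (brdAt_iff _ _ _).1 hbrd
  have hm := h3 (2 * p.length - i - 1) (by omega)
  have hidx : i + 1 - p.length + (2 * p.length - i - 1) = p.length := by omega
  rw [hidx] at hm
  have hmid : (p ++ '#' :: l)[p.length]? = some '#' := by
    rw [List.getElem?_append_right (le_refl _)]
    simp
  rw [List.getElem?_append_left (by omega), hmid] at hm
  exact List.mem_of_getElem? hm

theorem miss_hash (p l : List Char)
    (h : ∃ q < l.length + 1, q + p.length ≤ l.length ∧
        (∀ m < p.length, l[q + m]? = p[m]?) ∧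
        ∃ k < q + 2 * p.length + 1, p.length < k ∧
          brdAt (p ++ '#' :: l) (q + 2 * p.length + 1) k = true) : '#' ∈ l := by
  obtain ⟨q, hqS1, hql, hocc, k', hk'b, hgt, hbrd'⟩ := h
  obtain ⟨h1, h2, h3⟩ := (brdAt_iff _ _ _).1 hbrd'
  have hm := h3 p.length hgt
  have hmid : (p ++ '#' :: l)[p.length]? = some '#' := by
    rw [List.getElem?_append_right (le_refl _)]
    simp
  rw [hmid] at hm
  have hidx : q + 2 * p.length + 1 - k' + p.length
      = p.length + 1 + (q + 2 * p.length - k') := by omega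
  rw [hidx, t_get_right] at hm
  exact List.mem_of_getElem? hm.symm

theorem unchanged (s prefix_ : String) (hnd : ¬ D_find_all_prefix_occurrences s prefix_) :
    find_all_prefix_occurrences s prefix_ = find_all_prefix_occurrences_alt s prefix_ := by
  by_cases hp : prefix_.toList = []
  · exact empty_case s prefix_ hp
  · have hnspur : ¬ (∃ i < (prefix_.toList ++ '#' :: s.toList).length,
        prefix_.toList.length + 1 ≤ i ∧ i < 2 * prefix_.toList.length ∧
        brdAt (prefix_.toList ++ '#' :: s.toList) (i + 1) prefix_.toList.length = true ∧
        ∀ k < i + 1, prefix_.toList.length < k →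
          brdAt (prefix_.toList ++ '#' :: s.toList) (i + 1) k = false) :=
      fun h => hnd ⟨hp, Or.inl (spur_hash prefix_.toList s.toList h), Or.inl h⟩
    have hnmiss : ¬ (∃ q < s.toList.length + 1, q + prefix_.toList.length ≤ s.toList.length ∧
        (∀ m < prefix_.toList.length, s.toList[q + m]? = prefix_.toList[m]?) ∧
        ∃ k < q + 2 * prefix_.toList.length + 1, prefix_.toList.length < k ∧
          brdAt (prefix_.toList ++ '#' :: s.toList) (q + 2 * prefix_.toList.length + 1) k = true) :=
      fun h => hnd ⟨hp, Or.inr (miss_hash prefix_.toList s.toList h), Or.inr h⟩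
    have := main_eq_list prefix_.toList s.toList hp hnspur hnmiss
    simp only [find_all_prefix_occurrences, find_all_prefix_occurrences_alt, if_neg hp]
    exact this

theorem tight_list (p l : List Char) (hp : p ≠ [])
    (hd : (∃ i < (p ++ '#' :: l).length, p.length + 1 ≤ i ∧ i < 2 * p.length ∧
        brdAt (p ++ '#' :: l) (i + 1) p.length = true ∧
        ∀ k < i + 1, p.length < k → brdAt (p ++ '#' :: l) (i + 1) k = false)
      ∨ (∃ q < l.length + 1, q + p.length ≤ l.length ∧
        (∀ m < p.length, l[q + m]? = p[m]?) ∧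
        ∃ k < q + 2 * p.length + 1, p.length < k ∧
          brdAt (p ++ '#' :: l) (q + 2 * p.length + 1) k = true)) :
    (PySem.List.pyRange ((p.length : Int) + 1) (((p ++ '#' :: l).length : Nat) : Int)).foldl
      (fun result i =>
        if PySem.List.pyGetD (prefix_function (p ++ '#' :: l)) i 0 = (p.length : Int) then
          result ++ [i - 2 * (p.length : Int)]
        else result) []
      ≠ (PySem.List.pyRange 0 ((l.length : Int) + 1)).filter
          (fun i => PySem.List.slice l (some i) (some (i + (p.length : Int))) == p) := by
  set t := p ++ '#' :: l with ht
  set L := p.length with hLdef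
  set S := l.length with hSdef
  have hL : 1 ≤ L := by
    rw [hLdef]; cases p
    · exact absurd rfl hp
    · simp
  have htlen : t.length = L + 1 + S := t_len p l
  have hG := prefix_function_spec t (by omega)
  set piv := prefix_function t with hpiv
  rw [PySem.List.foldl_append_ite (fun i => PySem.List.pyGetD piv i 0 = (L : Int))
        (fun i => i - 2 * (L : Int)), List.nil_append]
  intro hAB
  rcases hd with ⟨iN, hiN, hiL, hi2L, hbrd, hno⟩ | ⟨q, hqS1, hql, hocc, k', hk'b, hgt, hbrd'⟩
  · -- spurious: A contains a negative element, B has none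
    have hg := hG iN (by omega)
    have hvL : piv.getD iN 0 = (L : Int) := by
      rw [good_eq_L t iN L _ hg]
      refine ⟨(brdAt_iff _ _ _).1 hbrd, fun k hk hbk => ?_⟩
      rcases Nat.lt_or_ge k (iN + 1) with hlt | hge
      · have := hno k hlt hk
        rw [(brdAt_iff _ _ _).2 hbk] at this
        exact absurd this (by decide)
      · have := hbk.1; omega
    have hxA : ((iN : Int) - 2 * (L : Int)) ∈
        (List.filter (fun i => decide (PySem.List.pyGetD piv i 0 = (L : Int)))
          (PySem.List.pyRange ((L : Int) + 1) ((t.length : Nat) : Int))).map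
          (fun i => i - 2 * (L : Int)) := by
      apply List.mem_map_of_mem
      rw [List.mem_filter]
      constructor
      · exact PySem.List.mem_pyRange_one.2 ⟨by omega, by omega⟩
      · rw [decide_eq_true_eq, PySem.List.pyGetD_natCast]
        exact hvL
    rw [hAB] at hxA
    have := (List.mem_filter.1 hxA).1
    have h0 := (PySem.List.mem_pyRange_one.1 this).1
    omega
  · -- missed occurrence: B contains q, A does not
    have hqB : ((q : Int)) ∈ (PySem.List.pyRange 0 ((S : Int) + 1)).filter
        (fun i => PySem.List.slice l (some i) (some (i + (L : Int))) == p) := by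
      rw [List.mem_filter]
      constructor
      · exact PySem.List.mem_pyRange_one.2 ⟨by omega, by omega⟩
      · rw [PySem.List.slice_natCast_add]
        rw [beq_iff_eq]
        exact (slice_eq_iff l p q hL).2 ⟨hql, hocc⟩
    rw [← hAB] at hqB
    rw [List.mem_map] at hqB
    obtain ⟨i, hif, hieq⟩ := hqB
    rw [List.mem_filter] at hif
    have hir := PySem.List.mem_pyRange_one.1 hif.1
    have hiv : i = ((q + 2 * L : Nat) : Int) := by omega
    rw [hiv, decide_eq_true_eq, PySem.List.pyGetD_natCast] at hif
    have hg := hG (q + 2 * L) (by omega)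
    have := (good_eq_L t (q + 2 * L) L _ hg).1 hif.2
    exact this.2 k' hgt ((brdAt_iff _ _ _).1 hbrd')

theorem tight_top (s prefix_ : String) (hd : D_find_all_prefix_occurrences s prefix_) :
    find_all_prefix_occurrences s prefix_ ≠ find_all_prefix_occurrences_alt s prefix_ := by
  obtain ⟨hp, -, hd2⟩ := hd
  simp only [find_all_prefix_occurrences, find_all_prefix_occurrences_alt, if_neg hp]
  exact tight_list prefix_.toList s.toList hp hd2

-- ===== VERDICT (by name: the statement is the Claim_ definition above) =====
theorem find_all_prefix_occurrences_spec : Claim_unchanged_find_all_prefix_occurrences := by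
  intro s prefix_ _ hnd
  exact unchanged s prefix_ hnd
theorem find_all_prefix_occurrences_changed : Claim_changed_find_all_prefix_occurrences := by
  unfold Claim_changed_find_all_prefix_occurrences; decide
theorem find_all_prefix_occurrences_tight : Claim_exact_find_all_prefix_occurrences := by
  intro s prefix_ _ hd
  exact tight_top s prefix_ hd
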